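-- pv_equiv track=rewrite | github.com/samuelmorenov/El-Favor-de-las-Guerreras | src/test/Utils.py | __getNumeroCartasSeleccionadas
-- ===== SOURCE A (Python) =====
-- def __getNumeroCartasSeleccionadas(accion):
--     num = 0
--     empiezanLosCeros = False
--     error = False
--     for i in range(1, len(accion), 1):
--         if((accion[i] != 0) & (not empiezanLosCeros)):
--             num = num + 1
--         elif((accion[i] == 0) & (not empiezanLosCeros)):
--             empiezanLosCeros = True
--         elif((accion[i] != 0) & empiezanLosCeros):
--             error = True
--             break
--         elif((accion[i] == 0) & empiezanLosCeros):
--             continue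
--     if(error):
--         return 0
--     else:
--         return num
-- ===== SOURCE B (Python) =====
-- def __getNumeroCartasSeleccionadas(accion):
--     tail = accion[1:]
--     num = 0
--     while num < len(tail) and tail[num] != 0:
--         num += 1
--     rest = tail[num:]
--     if any(x != 0 for x in rest):
--         return 0
--     return num
-- ===== Notes on version B (the rewrite author's own statement) =====
-- stated objective: simpler
-- what changed: Replaced the single flag/error-state pass over indices 1..n with a two-phase decomposition: count the leading nonzeros of accion[1:], then validate that the remaining suffix is all zeros.
import Mathlib
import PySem

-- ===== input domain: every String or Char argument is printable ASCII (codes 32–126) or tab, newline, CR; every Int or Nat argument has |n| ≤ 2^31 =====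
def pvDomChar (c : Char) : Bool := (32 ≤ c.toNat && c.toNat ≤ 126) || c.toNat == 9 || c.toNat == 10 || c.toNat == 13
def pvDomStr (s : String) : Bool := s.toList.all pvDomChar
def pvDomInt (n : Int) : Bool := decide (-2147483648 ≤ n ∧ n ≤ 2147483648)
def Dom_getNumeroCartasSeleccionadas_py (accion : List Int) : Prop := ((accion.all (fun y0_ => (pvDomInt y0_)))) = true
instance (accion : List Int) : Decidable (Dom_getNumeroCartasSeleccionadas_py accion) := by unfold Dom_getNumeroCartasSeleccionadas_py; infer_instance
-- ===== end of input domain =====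

-- B replaces A's flag-driven single pass with a prefix-count plus suffix-validation decomposition (same cost, simpler).


-- ===== PORT A =====
-- the for-loop over i in range(1, len(accion)) as structural recursion over accion.drop 1,
-- carrying (num, empiezanLosCeros); the 'error = True; break' branch returns (num, true).
def pvALoop : List Int → Int → Bool → Int × Bool
  | [], num, _ => (num, false)
  | x :: xs, num, emp =>
    if x ≠ 0 ∧ ¬emp then pvALoop xs (num + 1) emp
    else if x = 0 ∧ ¬emp then pvALoop xs num true
    else if x ≠ 0 ∧ emp then (num, true)
    else pvALoop xs num emp

def getNumeroCartasSeleccionadas_py (accion : List Int) : Int :=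
  let r := pvALoop (accion.drop 1) 0 false
  if r.2 then 0 else r.1

-- ===== PORT B =====
-- phase one of Source B: the while-loop counting leading nonzeros of tail
def pvBCount : List Int → Nat
  | [] => 0
  | x :: xs => if x ≠ 0 then pvBCount xs + 1 else 0

def getNumeroCartasSeleccionadas_py_alt (accion : List Int) : Int :=
  let tail := accion.drop 1
  let num := pvBCount tail
  let rest := tail.drop num
  if rest.any (fun x => x ≠ 0) then 0 else (num : Int)

-- ===== PRECONDITION & SPEC =====
def Spec_getNumeroCartasSeleccionadas_py (accion : List Int) (out : Int) : Prop := out = getNumeroCartasSeleccionadas_py_alt accion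
instance (accion : List Int) (out : Int) : Decidable (Spec_getNumeroCartasSeleccionadas_py accion out) := by unfold Spec_getNumeroCartasSeleccionadas_py; infer_instance

-- ===== CLAIM (what is proved, stated in full; the proofs are below) =====
def Claim_equal_getNumeroCartasSeleccionadas_py : Prop := ∀ (accion : List Int), Dom_getNumeroCartasSeleccionadas_py accion → Spec_getNumeroCartasSeleccionadas_py accion (getNumeroCartasSeleccionadas_py accion)

-- ===== LEMMAS AND PROOFS =====
-- once empiezanLosCeros is set, A's loop reports error iff some later element is nonzero
theorem pvALoop_true (xs : List Int) : ∀ (num : Int),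
    pvALoop xs num true = (num, xs.any (fun x => x ≠ 0)) := by
  induction xs with
  | nil => intro num; simp [pvALoop]
  | cons x xs ih =>
    intro num
    by_cases hx : x = 0 <;> simp [pvALoop, hx, ih]

-- before the first zero, A's loop adds the prefix-count and then error-checks the suffix
theorem pvALoop_false (xs : List Int) : ∀ (num : Int),
    pvALoop xs num false
      = (num + (pvBCount xs : Int), (xs.drop (pvBCount xs)).any (fun x => x ≠ 0)) := by
  induction xs with
  | nil => intro num; simp [pvALoop, pvBCount]
  | cons x xs ih =>
    intro num
    by_cases hx : x = 0
    · simp [pvALoop, pvBCount, hx, pvALoop_true]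
    · simp [pvALoop, pvBCount, hx, ih]
      ring

-- ===== VERDICT (by name: the statement is the Claim_ definition above) =====
theorem getNumeroCartasSeleccionadas_py_spec : Claim_equal_getNumeroCartasSeleccionadas_py := by
  intro accion _
  unfold Spec_getNumeroCartasSeleccionadas_py getNumeroCartasSeleccionadas_py getNumeroCartasSeleccionadas_py_alt
  simp [pvALoop_false]
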